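-- pv_equiv track=rewrite | github.com/CalixBarrus/ConDySta | intercept/instrument.py | register_index_to_arg_index
-- ===== SOURCE A (Python) =====
-- def register_index_to_arg_index(is_static, register_index, signature_arg_types):
--     """
--     Return the function arg index to which the given register index corresponds. Return None if register
--     corresponds to the "this" object.
--     """
--     if not is_static and register_index == 0:
--         return None
--
--     skip_next = False
--     cur_arg_index = 0
--
--     # Skip the first register_index if the invoke was static
--     register_indices = range(register_index+1) if is_static else range(1, register_index+1)
--
--     for cur_register_index in register_indices:
--         if skip_next:
--             skip_next = False
--             # In this branch, do not update cur_arg_index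
--             continue
--
--         if signature_arg_types[cur_arg_index] == 'J' or signature_arg_types[cur_arg_index] == 'D':
--             if register_index == cur_register_index or register_index == cur_register_index + 1:
--                 return cur_arg_index
--             else:
--                 skip_next = True
--
--         if cur_register_index == register_index:
--             return cur_arg_index
--
--         cur_arg_index += 1
--
--     raise AssertionError("Should have used one of the returns in the loop")
-- ===== SOURCE B (Python) =====
-- def register_index_to_arg_index(is_static, register_index, signature_arg_types):
--     """
--     Return the function arg index to which the given register index corresponds. Return None if register
--     corresponds to the "this" object.
--     """
--     if not is_static and register_index == 0:
--         return None
--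
--     reg = 0 if is_static else 1
--     i = 0
--     while True:
--         t = signature_arg_types[i]  # IndexError when register_index is past the register span, like A
--         width = 2 if t == 'J' or t == 'D' else 1
--         if reg <= register_index < reg + width:
--             return i
--         reg += width
--         i += 1
-- ===== Notes on version B (the rewrite author's own statement) =====
-- stated objective: simpler
-- what changed: Replaces A's per-register iteration with a skip_next flag by a per-argument loop that accumulates register positions by each type's width (2 for 'J'/'D', else 1) and returns the argument index whose register interval contains register_index.
import Mathlib
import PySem

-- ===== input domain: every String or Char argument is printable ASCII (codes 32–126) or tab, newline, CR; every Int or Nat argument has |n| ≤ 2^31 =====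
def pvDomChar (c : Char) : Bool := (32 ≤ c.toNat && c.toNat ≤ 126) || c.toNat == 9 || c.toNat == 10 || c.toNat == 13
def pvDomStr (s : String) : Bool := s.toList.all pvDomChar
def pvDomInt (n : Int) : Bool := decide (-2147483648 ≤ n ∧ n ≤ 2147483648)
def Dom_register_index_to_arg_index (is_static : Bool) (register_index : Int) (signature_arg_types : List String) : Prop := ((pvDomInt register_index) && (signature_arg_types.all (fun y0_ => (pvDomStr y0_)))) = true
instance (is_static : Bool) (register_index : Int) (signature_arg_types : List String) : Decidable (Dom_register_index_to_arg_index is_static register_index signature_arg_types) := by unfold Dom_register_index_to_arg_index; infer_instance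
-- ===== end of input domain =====

-- B replaces A's per-register loop (with a skip_next flag) by a per-argument loop that
-- accumulates the register position by each type's width; equivalence is proved on the
-- inputs where A returns normally (Pre_).

-- ===== PORT A =====
-- loop over the remaining register indices; state = (skip_next, cur_arg_index).
-- 'none' is returned both for Python's 'return None' and on the AssertionError /
-- IndexError paths; those raising inputs are excluded by Pre_.
def pvALoop (register_index : Int) (types : List String) :
    List Int → Bool → Int → Option Int
  | [], _, _ => none  -- AssertionError (outside Pre_)
  | cur :: rest, skip, argIdx =>
    if skip then pvALoop register_index types rest false argIdx
    else
      match PySem.List.pyGet? types argIdx with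
      | none => none  -- IndexError (outside Pre_)
      | some t =>
        if t == "J" || t == "D" then
          if register_index == cur || register_index == cur + 1 then some argIdx
          else
            -- skip_next := true, then fall through to the final check
            if cur == register_index then some argIdx
            else pvALoop register_index types rest true (argIdx + 1)
        else
          if cur == register_index then some argIdx
          else pvALoop register_index types rest false (argIdx + 1)

def register_index_to_arg_index (is_static : Bool) (register_index : Int) (signature_arg_types : List String) : Option Int :=
  if !is_static && register_index == 0 then none
  else
    let register_indices :=
      if is_static then PySem.List.pyRange 0 (register_index + 1) 1
      else PySem.List.pyRange 1 (register_index + 1) 1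
    pvALoop register_index signature_arg_types register_indices false 0

-- ===== PORT B =====
-- walk the argument types, keeping (reg = register position of current arg, i = arg index)
def pvBLoop (register_index : Int) : List String → Int → Int → Option Int
  | [], _, _ => none  -- IndexError (outside Pre_)
  | t :: rest, reg, i =>
    let width : Int := if t == "J" || t == "D" then 2 else 1
    if reg ≤ register_index ∧ register_index < reg + width then some i
    else pvBLoop register_index rest (reg + width) (i + 1)

def register_index_to_arg_index_alt (is_static : Bool) (register_index : Int) (signature_arg_types : List String) : Option Int :=
  if !is_static && register_index == 0 then none
  else pvBLoop register_index signature_arg_types (if is_static then 0 else 1) 0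

-- ===== PRECONDITION & SPEC =====
def pvWidth (t : String) : Int := if t == "J" || t == "D" then 2 else 1
def pvWidthSum : List String → Int
  | [] => 0
  | t :: rest => pvWidth t + pvWidthSum rest

-- Pre_ excludes exactly the inputs on which A raises: negative register_index
-- (AssertionError) and register_index past the span of registers covered by the
-- signature (IndexError); on every input in Pre_ A returns normally.
def Pre_register_index_to_arg_index (is_static : Bool) (register_index : Int) (signature_arg_types : List String) : Prop :=
  0 ≤ register_index ∧
  register_index < (if is_static then 0 else 1) + pvWidthSum signature_arg_types
instance (is_static : Bool) (register_index : Int) (signature_arg_types : List String) : Decidable (Pre_register_index_to_arg_index is_static register_index signature_arg_types) := by unfold Pre_register_index_to_arg_index; infer_instance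

def pvWitness_register_index_to_arg_index : Bool × Int × List String := (true, 2, ["I", "J", "I"])

def Spec_register_index_to_arg_index (is_static : Bool) (register_index : Int) (signature_arg_types : List String) (out : Option Int) : Prop := out = register_index_to_arg_index_alt is_static register_index signature_arg_types
instance (is_static : Bool) (register_index : Int) (signature_arg_types : List String) (out : Option Int) : Decidable (Spec_register_index_to_arg_index is_static register_index signature_arg_types out) := by unfold Spec_register_index_to_arg_index; infer_instance

-- ===== CLAIM (what is proved, stated in full; the proofs are below) =====
def Claim_equal_register_index_to_arg_index : Prop := ∀ (is_static : Bool) (register_index : Int) (signature_arg_types : List String), Dom_register_index_to_arg_index is_static register_index signature_arg_types → Pre_register_index_to_arg_index is_static register_index signature_arg_types → Spec_register_index_to_arg_index is_static register_index signature_arg_types (register_index_to_arg_index is_static register_index signature_arg_types)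

-- ===== LEMMAS AND PROOFS =====
theorem pvALoop_skip (R : Int) (types : List String) (c : Int) (rest : List Int) (i : Int) :
    pvALoop R types (c :: rest) true i = pvALoop R types rest false i := by
  simp [pvALoop]

theorem pvGet_drop (types rest : List String) (i : Int) (hi : 0 ≤ i)
    (h : types.drop i.toNat = rest) :
    PySem.List.pyGet? types i = rest.head? := by
  rw [PySem.List.pyGet?_of_nonneg _ hi, ← List.head?_drop, h]

theorem pvLoop_agree (rest : List String) (types : List String) (R : Int) :
    ∀ (i p : Int), 0 ≤ i → types.drop i.toNat = rest → p ≤ R →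
    R < p + pvWidthSum rest →
    pvALoop R types (PySem.List.pyRange p (R + 1) 1) false i = pvBLoop R rest p i := by
  induction rest with
  | nil =>
    intro i p _ _ hpR hlt
    simp [pvWidthSum] at hlt
    omega
  | cons t rest ih =>
    intro i p hi hdrop hpR hlt
    have hdrop' : types.drop (i + 1).toNat = rest := by
      have h1 : (i + 1).toNat = i.toNat + 1 := by omega
      rw [h1, ← List.drop_drop, hdrop, List.drop_one, List.tail_cons]
    have hget : PySem.List.pyGet? types i = some t := by
      rw [pvGet_drop types (t :: rest) i hi hdrop]; rfl
    have hsum : pvWidthSum (t :: rest) = pvWidth t + pvWidthSum rest := rfl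
    rw [PySem.List.pyRange_one_cons (by omega)]
    simp only [pvALoop, pvBLoop, Bool.false_eq_true, if_false, hget]
    by_cases hw : (t == "J" || t == "D") = true
    · have hw2 : pvWidth t = 2 := by simp [pvWidth, hw]
      rw [hsum, hw2] at hlt
      simp only [hw, if_true]
      by_cases h1 : R = p ∨ R = p + 1
      · have hA : (R == p || R == p + 1) = true := by
          rcases h1 with h | h <;> simp [h]
        rw [if_pos hA, if_pos (by omega)]
      · rw [if_neg (by simp; omega), if_neg (by simp; omega), if_neg (by omega)]
        rw [PySem.List.pyRange_one_cons (by omega), pvALoop_skip, show p + 1 + 1 = p + 2 by ring]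
        exact ih (i + 1) (p + 2) (by omega) hdrop' (by omega) (by omega)
    · have hw2 : pvWidth t = 1 := by simp [pvWidth]; simpa using hw
      rw [hsum, hw2] at hlt
      simp only [hw, Bool.false_eq_true, if_false]
      by_cases h1 : R = p
      · have hA : (p == R) = true := by simp [h1]
        rw [if_pos hA, if_pos (by omega)]
      · rw [if_neg (by simp; omega), if_neg (by omega)]
        exact ih (i + 1) (p + 1) (by omega) hdrop' (by omega) (by omega)

-- ===== VERDICT (by name: the statement is the Claim_ definition above) =====
theorem register_index_to_arg_index_spec : Claim_equal_register_index_to_arg_index := by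
  intro is_static R types _ hpre
  obtain ⟨h0, hlt⟩ := hpre
  unfold Spec_register_index_to_arg_index register_index_to_arg_index register_index_to_arg_index_alt
  by_cases hg : (!is_static && R == 0) = true
  · simp [hg]
  · rw [if_neg hg, if_neg hg]
    cases is_static with
    | true =>
      exact pvLoop_agree types types R 0 0 le_rfl (by simp) h0 (by simpa using hlt)
    | false =>
      have hR1 : 1 ≤ R := by simp at hg; omega
      simp only [Bool.false_eq_true, if_false] at *
      exact pvLoop_agree types types R 0 1 le_rfl (by simp) hR1 (by omega)
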